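-- pv_equiv track=rewrite | github.com/shaharsh624/Information-Security | Information Security Lab/PRACTICE/InfoSec/Hill_Cipher.py | get_plain_text_matrix
-- ===== SOURCE A (Python) =====
-- def get_plain_text_matrix(key):
--     K = [[0] * (len(key) // 2) for _ in range(2)]
--     length = 0
--     for i in range(len(key) // 2):
--         for j in range(2):
--             K[j][i] = ord(key[length]) - 65
--             length += 1
--     return K
-- ===== SOURCE B (Python) =====
-- def get_plain_text_matrix(key):
--     n = len(key) // 2
--     return [[ord(c) - 65 for c in key[:2 * n:2]],
--             [ord(c) - 65 for c in key[1:2 * n:2]]]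
-- ===== Notes on version B (the rewrite author's own statement) =====
-- stated objective: idiomatic
-- what changed: Replaces the interleaved nested loop that threads one running character index across both rows of a preallocated zero matrix with two independent parity-strided slices (key[:2n:2] and key[1:2n:2]), each mapped to its row directly.
import Mathlib
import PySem

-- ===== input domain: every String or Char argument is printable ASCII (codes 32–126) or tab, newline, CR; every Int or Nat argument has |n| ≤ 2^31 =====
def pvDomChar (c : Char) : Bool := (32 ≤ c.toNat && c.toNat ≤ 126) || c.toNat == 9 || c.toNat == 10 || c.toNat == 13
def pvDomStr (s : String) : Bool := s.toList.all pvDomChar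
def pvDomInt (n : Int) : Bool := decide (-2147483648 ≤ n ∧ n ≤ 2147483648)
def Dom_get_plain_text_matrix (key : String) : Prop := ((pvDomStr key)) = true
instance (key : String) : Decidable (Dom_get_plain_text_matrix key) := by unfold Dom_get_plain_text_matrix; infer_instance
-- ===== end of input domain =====

-- B builds the two rows independently as strided slices instead of A's interleaved
-- nested loop threading one running index over a preallocated zero matrix (idiomatic).


-- ===== PORT A =====
-- K = [[0]*(len(key)//2) for _ in range(2)]; length = 0;
-- for i in range(len(key)//2): for j in range(2): K[j][i] = ord(key[length]) - 65; length += 1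
-- (key[length] is always in range, so it is ported with pyGetD, exact here)
def get_plain_text_matrix (key : String) : List (List Int) :=
  let half : Int := PySem.Int.floordiv (PySem.Str.len key) 2
  let K : List (List Int) := [List.replicate half.toNat 0, List.replicate half.toNat 0]
  let st :=
    (PySem.List.pyRange 0 half 1).foldl
      (fun (st : List (List Int) × Int) i =>
        (PySem.List.pyRange 0 2 1).foldl
          (fun (st : List (List Int) × Int) j =>
            let v : Int := ((PySem.List.pyGetD key.toList st.2 ' ').toNat : Int) - 65
            (st.1.set j.toNat ((st.1.getD j.toNat []).set i.toNat v), st.2 + 1))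
          st)
      (K, 0)
  st.1

-- ===== PORT B =====
-- n = len(key)//2; return [[ord(c)-65 for c in key[:2*n:2]], [ord(c)-65 for c in key[1:2*n:2]]]
-- (step 2 ≠ 0, so the slices never raise; .getD [] is exact here)
def get_plain_text_matrix_alt (key : String) : List (List Int) :=
  let n : Int := PySem.Int.floordiv (PySem.Str.len key) 2
  let row0 := ((PySem.List.slice? key.toList none (some (2 * n)) 2).getD []).map
    (fun c => ((c.toNat : Int) - 65))
  let row1 := ((PySem.List.slice? key.toList (some 1) (some (2 * n)) 2).getD []).map
    (fun c => ((c.toNat : Int) - 65))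
  [row0, row1]

-- ===== PRECONDITION & SPEC =====
def Spec_get_plain_text_matrix (key : String) (out : List (List Int)) : Prop := out = get_plain_text_matrix_alt key
instance (key : String) (out : List (List Int)) : Decidable (Spec_get_plain_text_matrix key out) := by unfold Spec_get_plain_text_matrix; infer_instance

-- ===== CLAIM (what is proved, stated in full; the proofs are below) =====
def Claim_equal_get_plain_text_matrix : Prop := ∀ (key : String), Dom_get_plain_text_matrix key → Spec_get_plain_text_matrix key (get_plain_text_matrix key)

-- ===== LEMMAS AND PROOFS =====

-- value Python stores at character index m
def pvVal (cs : List Char) (m : Nat) : Int := ((cs.getD m ' ').toNat : Int) - 65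

-- row r after the first k outer iterations: positions < k filled, rest still 0
def pvRow (cs : List Char) (r k : Nat) : List Int :=
  (List.range (cs.length / 2)).map (fun i => if i < k then pvVal cs (2 * i + r) else 0)

theorem pvRow_zero (cs : List Char) (r : Nat) :
    pvRow cs r 0 = List.replicate (cs.length / 2) 0 := by
  simp [pvRow, List.map_const']

theorem pvRow_set (cs : List Char) (r k : Nat) (hk : k < cs.length / 2) :
    (pvRow cs r k).set k (pvVal cs (2 * k + r)) = pvRow cs r (k + 1) := by
  apply List.ext_getElem
  · simp [pvRow]
  · intro i h1 h2
    simp only [pvRow, List.getElem_set, List.getElem_map, List.getElem_range]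
    simp only [pvRow, List.length_map, List.length_range] at h2
    by_cases hik : i = k
    · subst hik; simp
    · simp only [if_neg (Ne.symm hik)]
      have : (i < k) ↔ (i < k + 1) := by omega
      simp [this]

theorem pvA_loop (cs : List Char) (k : Nat) (hk : k ≤ cs.length / 2) :
    (PySem.List.pyRange 0 (k : Int) 1).foldl
      (fun (st : List (List Int) × Int) i =>
        (PySem.List.pyRange 0 2 1).foldl
          (fun (st : List (List Int) × Int) j =>
            let v : Int := ((PySem.List.pyGetD cs st.2 ' ').toNat : Int) - 65
            (st.1.set j.toNat ((st.1.getD j.toNat []).set i.toNat v), st.2 + 1))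
          st)
      ([pvRow cs 0 0, pvRow cs 1 0], 0)
    = ([pvRow cs 0 k, pvRow cs 1 k], (2 * k : Int)) := by
  induction k with
  | zero => simp [PySem.List.pyRange_one_eq_nil]
  | succ k ih =>
      have hk' : k ≤ cs.length / 2 := Nat.le_of_succ_le hk
      have hlt : k < cs.length / 2 := hk
      have hcast : ((k : Int) + 1) = ((k + 1 : Nat) : Int) := by push_cast; ring
      rw [show ((k + 1 : Nat) : Int) = (k : Int) + 1 by push_cast; ring,
        PySem.List.pyRange_one_succ_right (by positivity), List.foldl_append, ih hk']
      have h2k : (0 : Int) ≤ 2 * (k : Int) := by positivity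
      have hidx0 : PySem.List.pyGetD cs (2 * (k : Int)) ' ' = cs.getD (2 * k) ' ' := by
        rw [show (2 * (k : Int)) = ((2 * k : Nat) : Int) by push_cast; ring]
        exact PySem.List.pyGetD_natCast cs (2 * k) ' '
      have hidx1 : PySem.List.pyGetD cs (2 * (k : Int) + 1) ' ' = cs.getD (2 * k + 1) ' ' := by
        rw [show (2 * (k : Int) + 1) = ((2 * k + 1 : Nat) : Int) by push_cast; ring]
        exact PySem.List.pyGetD_natCast cs (2 * k + 1) ' '
      simp only [List.foldl_cons, List.foldl_nil,
        show PySem.List.pyRange 0 2 1 = [0, 1] from rfl]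
      simp only [show Int.toNat 0 = 0 from rfl, show Int.toNat 1 = 1 from rfl,
        Int.toNat_natCast, hidx0, hidx1, List.getD_cons_zero, List.getD_cons_succ,
        List.set_cons_zero, List.set_cons_succ]
      rw [show (2 * k : Nat) = 2 * k + 0 from rfl] at hidx0
      have e0 : (pvRow cs 0 k).set k (pvVal cs (2 * k + 0)) = pvRow cs 0 (k + 1) :=
        pvRow_set cs 0 k hlt
      have e1 : (pvRow cs 1 k).set k (pvVal cs (2 * k + 1)) = pvRow cs 1 (k + 1) :=
        pvRow_set cs 1 k hlt
      simp only [pvVal] at e0 e1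
      rw [show 2 * k + 0 = 2 * k from rfl] at e0
      rw [e0, e1]
      simp only [Prod.mk.injEq, true_and]
      ring

-- each parity-strided slice bounded by 2*(len/2) is exactly one row of indices
theorem pvSlice0 (cs : List Char) :
    PySem.List.slice? cs none (some (2 * ((cs.length : Nat) / 2 : Nat) : Int)) 2
    = some ((List.range (cs.length / 2)).map (fun i => cs.getD (2 * i) ' ')) := by
  simp only [PySem.List.slice?, PySem.List.sliceIndices]
  norm_num
  have hc : (if (0:Int) <
        (if 2 * ((cs.length:Int) / 2) < 0 then max (2 * ((cs.length:Int) / 2) + (cs.length:Int)) 0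
          else min (2 * ((cs.length:Int) / 2)) (cs.length:Int)) then
        ((((if 2 * ((cs.length:Int) / 2) < 0 then max (2 * ((cs.length:Int) / 2) + (cs.length:Int)) 0
            else min (2 * ((cs.length:Int) / 2)) (cs.length:Int)) + 2 - 1) / 2)).toNat
        else 0) = cs.length / 2 := by
    split_ifs <;> omega
  rw [hc]
  apply List.filterMap_eq_map_iff_forall_eq_some.mpr
  intro a ha
  simp only [List.mem_range] at ha
  have h2a : 2 * a < cs.length := by omega
  have ht : ((2 * (a:Int)).toNat) = 2 * a := by omega
  rw [ht]
  simp [List.getElem?_eq_getElem h2a]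

theorem pvSlice1 (cs : List Char) :
    PySem.List.slice? cs (some 1) (some (2 * ((cs.length : Nat) / 2 : Nat) : Int)) 2
    = some ((List.range (cs.length / 2)).map (fun i => cs.getD (2 * i + 1) ' ')) := by
  simp only [PySem.List.slice?, PySem.List.sliceIndices]
  norm_num
  by_cases hL : cs.length = 0
  · simp [hL]
  · have hmin : min (1:Int) (cs.length:Int) = 1 := by omega
    rw [hmin]
    have hc : (if ((1:Int) <
          (if 2 * ((cs.length:Int) / 2) < 0 then max (2 * ((cs.length:Int) / 2) + (cs.length:Int)) 0
            else min (2 * ((cs.length:Int) / 2)) (cs.length:Int)) ∨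
          (cs.length:Int) <
          (if 2 * ((cs.length:Int) / 2) < 0 then max (2 * ((cs.length:Int) / 2) + (cs.length:Int)) 0
            else min (2 * ((cs.length:Int) / 2)) (cs.length:Int))) then
          ((((if 2 * ((cs.length:Int) / 2) < 0 then max (2 * ((cs.length:Int) / 2) + (cs.length:Int)) 0
              else min (2 * ((cs.length:Int) / 2)) (cs.length:Int)) - 1 + 2 - 1) / 2)).toNat
          else 0) = cs.length / 2 := by
      split_ifs <;> omega
    rw [hc]
    apply List.filterMap_eq_map_iff_forall_eq_some.mpr
    intro a ha
    simp only [List.mem_range] at ha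
    have h2a : 2 * a + 1 < cs.length := by omega
    have ht : ((1 + 2 * (a:Int)).toNat) = 2 * a + 1 := by omega
    rw [ht]
    simp [List.getElem?_eq_getElem h2a]

-- a fully-filled row is just the map over its parity class
theorem pvRow_full (cs : List Char) (r : Nat) :
    pvRow cs r (cs.length / 2)
    = (List.range (cs.length / 2)).map (fun i => ((cs.getD (2 * i + r) ' ').toNat : Int) - 65) := by
  unfold pvRow pvVal
  apply List.map_congr_left
  intro a ha
  simp only [List.mem_range] at ha
  simp [ha]

-- ===== VERDICT (by name: the statement is the Claim_ definition above) =====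
theorem get_plain_text_matrix_spec : Claim_equal_get_plain_text_matrix := by
  intro key _
  unfold Spec_get_plain_text_matrix get_plain_text_matrix get_plain_text_matrix_alt
  have hfd : PySem.Int.floordiv (PySem.Str.len key) 2 = ((key.toList.length / 2 : Nat) : Int) := by
    simp only [PySem.Str.len]
    exact_mod_cast PySem.Int.floordiv_natCast key.toList.length 2
  simp only [hfd]
  have htn : (((key.toList.length / 2 : Nat) : Int)).toNat = key.toList.length / 2 := by omega
  rw [htn]
  rw [show List.replicate (key.toList.length / 2) (0 : Int) = pvRow key.toList 0 0 from
      (pvRow_zero key.toList 0).symm]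
  conv_lhs => rw [show pvRow key.toList 0 0 = pvRow key.toList 1 0 from by
      simp [pvRow_zero]]
  conv_lhs => rw [show [pvRow key.toList 1 0, pvRow key.toList 1 0]
        = [pvRow key.toList 0 0, pvRow key.toList 1 0] from by simp [pvRow_zero]]
  rw [pvA_loop key.toList (key.toList.length / 2) le_rfl]
  rw [show (2 : Int) * ((key.toList.length / 2 : Nat) : Int)
        = 2 * (((key.toList.length : Nat) / 2 : Nat) : Int) from rfl]
  rw [pvSlice0 key.toList, pvSlice1 key.toList]
  simp only [Option.getD_some, List.map_map]
  rw [pvRow_full, pvRow_full]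
  simp [Function.comp_def]
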